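-- pv_equiv track=rewrite | github.com/TheApeMachine/decoupled-bottleneck-attention | production/config_impl/intent.py | derive_n_head
-- ===== SOURCE A (Python) =====
-- def derive_n_head(d_model: int) -> int:
--     """Why: pick a head count that makes head_dim "nice" while dividing d_model exactly."""
--     d_model = int(max(1, d_model))
--     want = max(1, int(round(d_model / 128.0)))
--     for delta in range(0, 64):
--         for cand in (want - delta, want + delta):
--             if cand >= 1 and d_model % cand == 0:
--                 return int(cand)
--     for cand in range(1, d_model + 1):
--         if d_model % cand == 0:
--             return int(cand)
--     return 1
-- ===== SOURCE B (Python) =====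
-- def derive_n_head(d_model: int) -> int:
--     """Build all divisors of d_model by trial division up to sqrt, then pick the
--     one nearest to round(d_model/128) (ties -> smaller) within the +/-63 window."""
--     m = int(max(1, d_model))
--     want = max(1, int(round(m / 128.0)))
--     divs = set()
--     i = 1
--     while i * i <= m:
--         if m % i == 0:
--             divs.add(i)
--             divs.add(m // i)
--         i += 1
--     near = [d for d in divs if abs(d - want) <= 63]
--     if not near:
--         return 1
--     return min(near, key=lambda d: (abs(d - want), d))
-- ===== Notes on version B (the rewrite author's own statement) =====
-- stated objective: alternative
-- what changed: A probes candidates outward from the target head count, testing divisibility at each widening step until the window is exhausted; B instead enumerates all divisors of d_model by trial division up to its square root, keeps those inside the same fixed window around the target, and selects the minimum under the (distance, value) key.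
import Mathlib
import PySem

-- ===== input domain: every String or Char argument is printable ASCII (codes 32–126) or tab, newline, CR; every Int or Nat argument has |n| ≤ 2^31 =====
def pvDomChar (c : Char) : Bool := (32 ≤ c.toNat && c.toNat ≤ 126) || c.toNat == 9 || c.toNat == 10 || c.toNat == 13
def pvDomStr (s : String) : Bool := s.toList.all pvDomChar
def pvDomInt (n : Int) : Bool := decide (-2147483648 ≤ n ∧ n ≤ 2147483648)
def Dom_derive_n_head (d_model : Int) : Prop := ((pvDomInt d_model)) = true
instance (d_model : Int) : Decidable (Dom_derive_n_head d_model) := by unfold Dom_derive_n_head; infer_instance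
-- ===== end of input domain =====

-- B replaces A's outward probing from `want` by enumerating all divisors via trial
-- division up to sqrt(d_model) and selecting the nearest-to-want one (alternative).


-- shared helper: Python's round(m / 128.0) (half-to-even). Exact for |m| ≤ 2^53
-- because m/128.0 is an exact double; both A and B contain this very expression.
def pvRound128 (m : Int) : Int :=
  let q := PySem.Int.floordiv m 128
  let r := PySem.Int.mod m 128
  if r < 64 then q else if 64 < r then q + 1 else if PySem.Int.mod q 2 = 0 then q else q + 1

-- ===== PORT A =====
-- 'for delta in range(0,64): for cand in (want-delta, want+delta): if cand>=1 and m%cand==0: return cand'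
def pvLoopA (m w : Int) (delta : Nat) : Option Int :=
  if delta < 64 then
    if 1 ≤ w - (delta : Int) ∧ PySem.Int.mod m (w - (delta : Int)) = 0 then some (w - (delta : Int))
    else if 1 ≤ w + (delta : Int) ∧ PySem.Int.mod m (w + (delta : Int)) = 0 then some (w + (delta : Int))
    else pvLoopA m w (delta + 1)
  else none
termination_by 64 - delta

-- 'for cand in range(1, m+1): if m % cand == 0: return cand'
def pvLoopF (m c : Int) : Option Int :=
  if h : c ≤ m then
    if PySem.Int.mod m c = 0 then some c else pvLoopF m (c + 1)
  else none
termination_by (m + 1 - c).toNat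
decreasing_by omega

def derive_n_head (d_model : Int) : Int :=
  let m := max 1 d_model
  let want := max 1 (pvRound128 m)
  match pvLoopA m want 0 with
  | some c => c
  | none =>
    match pvLoopF m 1 with
    | some c => c
    | none => 1

-- ===== PORT B =====
-- 'while i*i <= m: if m % i == 0: divs.add(i); divs.add(m//i); i += 1'
def pvDivLoop (m i : Int) (s : PySem.Set Int) : PySem.Set Int :=
  if h : i * i ≤ m then
    pvDivLoop m (i + 1)
      (if PySem.Int.mod m i = 0 then
        PySem.Set.add (PySem.Set.add s i) (PySem.Int.floordiv m i)
      else s)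
  else s
termination_by (m + 1 - i).toNat
decreasing_by
  have hii : i ≤ i * i := by
    by_cases h0 : i ≤ 0
    · exact h0.trans (mul_self_nonneg i)
    · nlinarith [show 1 ≤ i by omega]
  omega

def derive_n_head_alt (d_model : Int) : Int :=
  let m := max 1 d_model
  let want := max 1 (pvRound128 m)
  let near := (pvDivLoop m 1 PySem.Set.empty).filter (fun d => decide (|d - want| ≤ 63))
  -- 'if not near: return 1; return min(near, key=lambda d: (abs(d-want), d))'
  match PySem.List.min2? near (fun d => |d - want|) (fun d => d) with
  | some r => r
  | none => 1

-- ===== PRECONDITION & SPEC =====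
def Spec_derive_n_head (d_model : Int) (out : Int) : Prop := out = derive_n_head_alt d_model
instance (d_model : Int) (out : Int) : Decidable (Spec_derive_n_head d_model out) := by unfold Spec_derive_n_head; infer_instance

-- ===== CLAIM (what is proved, stated in full; the proofs are below) =====
def Claim_equal_derive_n_head : Prop := ∀ (d_model : Int), Dom_derive_n_head d_model → Spec_derive_n_head d_model (derive_n_head d_model)

-- ===== LEMMAS AND PROOFS =====

-- d is a divisor of m within the ±63 window around w
def pvGood (m w d : Int) : Prop := 1 ≤ d ∧ d ∣ m ∧ (d - w).natAbs ≤ 63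

-- A's probing loop: result characterization
theorem pvLoopA_spec (m w : Int) (k : Nat)
    (hno : ∀ d, pvGood m w d → (k : Int) ≤ (d - w).natAbs) :
    (∃ r, pvLoopA m w k = some r ∧ pvGood m w r ∧
      ∀ d, pvGood m w d → ((r - w).natAbs < (d - w).natAbs ∨ ((r - w).natAbs = (d - w).natAbs ∧ r ≤ d)))
    ∨ (pvLoopA m w k = none ∧ ∀ d, ¬ pvGood m w d) := by
  revert hno
  induction k using pvLoopA.induct m w with
  | case1 x hx hc =>
    intro hno
    rw [pvLoopA, if_pos hx, if_pos hc]
    refine Or.inl ⟨w - (x : Int), rfl, ?_, ?_⟩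
    · exact ⟨hc.1, (PySem.Int.mod_eq_zero_iff_dvd m _).mp hc.2, by omega⟩
    · intro d hd
      have h1 := hno d hd
      omega
  | case2 x hx hc1 hc2 =>
    intro hno
    rw [pvLoopA, if_pos hx, if_neg hc1, if_pos hc2]
    refine Or.inl ⟨w + (x : Int), rfl, ?_, ?_⟩
    · exact ⟨hc2.1, (PySem.Int.mod_eq_zero_iff_dvd m _).mp hc2.2, by omega⟩
    · intro d hd
      have h1 := hno d hd
      rcases lt_or_eq_of_le h1 with h2 | h2
      · left; omega
      · -- distance exactly x: d = w - x or d = w + x; the first fails its test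
        right
        have hd' : d = w - (x : Int) ∨ d = w + (x : Int) := by omega
        rcases hd' with rfl | rfl
        · exfalso
          exact hc1 ⟨hd.1, (PySem.Int.mod_eq_zero_iff_dvd m _).mpr hd.2.1⟩
        · omega
  | case3 x hx hc1 hc2 ih =>
    intro hno
    rw [pvLoopA, if_pos hx, if_neg hc1, if_neg hc2]
    apply ih
    intro d hd
    have h1 := hno d hd
    rcases lt_or_eq_of_le h1 with h2 | h2
    · omega
    · exfalso
      have hd' : d = w - (x : Int) ∨ d = w + (x : Int) := by omega
      rcases hd' with rfl | rfl
      · exact hc1 ⟨hd.1, (PySem.Int.mod_eq_zero_iff_dvd m _).mpr hd.2.1⟩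
      · exact hc2 ⟨hd.1, (PySem.Int.mod_eq_zero_iff_dvd m _).mpr hd.2.1⟩
  | case4 x hx =>
    intro hno
    rw [pvLoopA, if_neg hx]
    refine Or.inr ⟨rfl, ?_⟩
    intro d hd
    have h1 := hno d hd
    have h2 := hd.2.2
    omega

-- A's fallback loop returns 1 on 1 ≤ m
theorem pvLoopF_one (m : Int) (hm : 1 ≤ m) : pvLoopF m 1 = some 1 := by
  have h1 : PySem.Int.mod m 1 = 0 := (PySem.Int.mod_eq_zero_iff_dvd m 1).mpr (one_dvd m)
  rw [pvLoopF, dif_pos hm, if_pos h1]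

-- membership in the trial-division set
theorem pvDivLoop_mem (m i : Int) (s : PySem.Set Int) (hi : 1 ≤ i) (d : Int) :
    d ∈ pvDivLoop m i s ↔ d ∈ s ∨ ∃ j, i ≤ j ∧ j * j ≤ m ∧ j ∣ m ∧ (d = j ∨ d = PySem.Int.floordiv m j) := by
  revert hi
  induction i, s using pvDivLoop.induct m with
  | case1 i s h ih =>
    intro hi
    rw [pvDivLoop, dif_pos h]
    simp only [dite_eq_ite] at ih
    rw [ih (by omega)]
    have hs' : d ∈ (if PySem.Int.mod m i = 0 then
        PySem.Set.add (PySem.Set.add s i) (PySem.Int.floordiv m i) else s) ↔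
        d ∈ s ∨ (PySem.Int.mod m i = 0 ∧ (d = i ∨ d = PySem.Int.floordiv m i)) := by
      by_cases hmod : PySem.Int.mod m i = 0
      · rw [if_pos hmod]
        rw [PySem.Set.mem_add, PySem.Set.mem_add]
        tauto
      · rw [if_neg hmod]
        tauto
    rw [hs']
    constructor
    · rintro ((hds | ⟨hmod, hdi⟩) | ⟨j, hj1, hj2, hj3, hj4⟩)
      · exact Or.inl hds
      · exact Or.inr ⟨i, le_refl i, h, (PySem.Int.mod_eq_zero_iff_dvd m i).mp hmod, hdi⟩
      · exact Or.inr ⟨j, by omega, hj2, hj3, hj4⟩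
    · rintro (hds | ⟨j, hj1, hj2, hj3, hj4⟩)
      · exact Or.inl (Or.inl hds)
      · rcases eq_or_lt_of_le hj1 with rfl | hlt
        · exact Or.inl (Or.inr ⟨(PySem.Int.mod_eq_zero_iff_dvd m i).mpr hj3, hj4⟩)
        · exact Or.inr ⟨j, by omega, hj2, hj3, hj4⟩
  | case2 i s h =>
    intro hi
    rw [pvDivLoop, dif_neg h]
    constructor
    · exact Or.inl
    · rintro (hds | ⟨j, hj1, hj2, hj3, hj4⟩)
      · exact hds
      · exfalso
        have : i * i ≤ j * j := by nlinarith
        omega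

theorem pvDivs_iff (m : Int) (hm : 1 ≤ m) (d : Int) :
    d ∈ pvDivLoop m 1 PySem.Set.empty ↔ 1 ≤ d ∧ d ∣ m := by
  rw [pvDivLoop_mem m 1 PySem.Set.empty (le_refl 1) d]
  constructor
  · rintro (hds | ⟨j, hj1, hj2, hj3, hj4⟩)
    · simp [PySem.Set.empty] at hds
    · have hfd : PySem.Int.floordiv m j = m / j :=
        PySem.Int.floordiv_eq_ediv_of_pos (by omega)
      have hprod : j * (m / j) = m := Int.mul_ediv_cancel' hj3
      have hq1 : 1 ≤ m / j := by nlinarith [hprod]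
      have hdv : m / j ∣ m := ⟨j, (Int.ediv_mul_cancel hj3).symm⟩
      rcases hj4 with rfl | rfl
      · exact ⟨hj1, hj3⟩
      · exact ⟨hfd ▸ hq1, hfd ▸ hdv⟩
  · rintro ⟨hd1, hdvd⟩
    have hprod : d * (m / d) = m := Int.mul_ediv_cancel' hdvd
    have he1 : 1 ≤ m / d := by nlinarith
    by_cases hsq : d * d ≤ m
    · exact Or.inr ⟨d, hd1, hsq, hdvd, Or.inl rfl⟩
    · refine Or.inr ⟨m / d, he1, ?_, Dvd.intro_left d hprod, Or.inr ?_⟩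
      · nlinarith
      · have hfd : PySem.Int.floordiv m (m / d) = m / (m / d) :=
          PySem.Int.floordiv_eq_ediv_of_pos (by omega)
        have h2 : d * (m / d) / (m / d) = d := Int.mul_ediv_cancel d (by omega)
        rw [hprod] at h2
        rw [hfd, h2]

-- one step of the fold underlying min2?
theorem pvMin2_cons_cons (k1 : Int → Int) (m x : Int) (t : List Int) :
    PySem.List.min2? (m :: x :: t) k1 (fun d => d) =
    PySem.List.min2?
      ((if k1 x < k1 m ∨ (¬ k1 m < k1 x ∧ x < m) then x else m) :: t) k1 (fun d => d) := by
  by_cases h : k1 x < k1 m ∨ (¬ k1 m < k1 x ∧ x < m)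
  · have hb : (decide (k1 x < k1 m) || !decide (k1 m < k1 x) && decide (x < m)) = true := by
      simp only [Bool.or_eq_true, Bool.and_eq_true, decide_eq_true_eq, Bool.not_eq_true',
        decide_eq_false_iff_not]
      tauto
    simp only [PySem.List.min2?, List.foldl_cons, hb, if_pos h, if_true]
  · have hb : (decide (k1 x < k1 m) || !decide (k1 m < k1 x) && decide (x < m)) = false := by
      simp only [Bool.or_eq_false_iff, Bool.and_eq_false_iff, decide_eq_false_iff_not,
        Bool.not_eq_false', decide_eq_true_eq]
      tauto
    simp only [PySem.List.min2?, List.foldl_cons, hb, if_neg h, Bool.false_eq_true, if_false]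

-- min2? starting from a head element
theorem pvMin2_go (k1 : Int → Int) (xs : List Int) (m : Int) :
    ∃ r, PySem.List.min2? (m :: xs) k1 (fun d => d) = some r ∧ (r = m ∨ r ∈ xs) ∧
      (k1 r < k1 m ∨ (k1 r = k1 m ∧ r ≤ m)) ∧
      ∀ d ∈ xs, (k1 r < k1 d ∨ (k1 r = k1 d ∧ r ≤ d)) := by
  induction xs generalizing m with
  | nil =>
    refine ⟨m, ?_, Or.inl rfl, Or.inr ⟨rfl, le_refl m⟩, by simp⟩
    simp [PySem.List.min2?]
  | cons x t ih =>
    rw [pvMin2_cons_cons]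
    by_cases hx : k1 x < k1 m ∨ (¬ k1 m < k1 x ∧ x < m)
    · rw [if_pos hx]
      obtain ⟨r, heq, hmem, hle, hall⟩ := ih x
      refine ⟨r, heq, ?_, ?_, ?_⟩
      · rcases hmem with h | h
        · exact Or.inr (h ▸ List.mem_cons_self)
        · exact Or.inr (List.mem_cons_of_mem _ h)
      · rcases hx with h | ⟨h1, h2⟩
        · rcases hle with h' | ⟨h1', h2'⟩
          · exact Or.inl (h'.trans h)
          · exact Or.inl (h1' ▸ h)
        · rcases hle with h' | ⟨h1', h2'⟩
          · rcases lt_trichotomy (k1 r) (k1 m) with hh | hh | hh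
            · exact Or.inl hh
            · exact Or.inr ⟨hh, by omega⟩
            · omega
          · rcases lt_trichotomy (k1 r) (k1 m) with hh | hh | hh
            · exact Or.inl hh
            · exact Or.inr ⟨hh, by omega⟩
            · omega
      · intro d hd
        rcases List.mem_cons.mp hd with rfl | hd'
        · exact hle
        · exact hall d hd'
    · rw [if_neg hx]
      obtain ⟨r, heq, hmem, hle, hall⟩ := ih m
      have hx' : ¬ k1 x < k1 m ∧ (k1 m < k1 x ∨ ¬ x < m) := by tauto
      refine ⟨r, heq, ?_, hle, ?_⟩
      · rcases hmem with h | h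
        · exact Or.inl h
        · exact Or.inr (List.mem_cons_of_mem _ h)
      · intro d hd
        rcases List.mem_cons.mp hd with rfl | hd'
        · rcases hx'.2 with hmx | hxm
          · rcases hle with h' | ⟨h1', h2'⟩
            · exact Or.inl (h'.trans hmx)
            · exact Or.inl (h1' ▸ hmx)
          · have hk : k1 m ≤ k1 d := by omega
            rcases hle with h' | ⟨h1', h2'⟩
            · rcases lt_or_eq_of_le hk with hh | hh
              · exact Or.inl (h'.trans hh)
              · exact Or.inl (hh ▸ h')
            · rcases lt_or_eq_of_le hk with hh | hh
              · exact Or.inl (h1' ▸ hh)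
              · exact Or.inr ⟨h1'.trans hh, by omega⟩
        · exact hall d hd'

-- min2? with identity second key: first component minimal, ties broken to the smaller element
theorem pvMin2_spec (k1 : Int → Int) (xs : List Int) :
    (∃ r, PySem.List.min2? xs k1 (fun d => d) = some r ∧ r ∈ xs ∧
      ∀ d ∈ xs, (k1 r < k1 d ∨ (k1 r = k1 d ∧ r ≤ d)))
    ∨ (PySem.List.min2? xs k1 (fun d => d) = none ∧ xs = []) := by
  cases xs with
  | nil => exact Or.inr ⟨rfl, rfl⟩
  | cons x t =>
    obtain ⟨r, heq, hmem, hle, hall⟩ := pvMin2_go k1 t x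
    refine Or.inl ⟨r, heq, ?_, ?_⟩
    · rcases hmem with rfl | h
      · exact List.mem_cons_self
      · exact List.mem_cons_of_mem _ h
    · intro d hd
      rcases List.mem_cons.mp hd with rfl | hd'
      · exact hle
      · exact hall d hd'

-- the two selection strategies agree for any m ≥ 1 and target w ≥ 1
theorem pvMain_core (m w : Int) (hm : 1 ≤ m) :
    (match pvLoopA m w 0 with
      | some c => c
      | none => match pvLoopF m 1 with | some c => c | none => 1) =
    (match PySem.List.min2? ((pvDivLoop m 1 PySem.Set.empty).filter (fun d => decide (|d - w| ≤ 63)))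
        (fun d => |d - w|) (fun d => d) with
      | some r => r
      | none => 1) := by
  have habs : ∀ a : Int, |a| = ((a.natAbs : Int)) := fun a => Int.abs_eq_natAbs a
  have hnear : ∀ d, d ∈ ((pvDivLoop m 1 PySem.Set.empty).filter (fun d => decide (|d - w| ≤ 63)))
      ↔ pvGood m w d := by
    intro d
    rw [List.mem_filter, pvDivs_iff m hm d]
    unfold pvGood
    rw [decide_eq_true_eq, habs (d - w)]
    constructor
    · rintro ⟨⟨h1, h2⟩, h3⟩; exact ⟨h1, h2, by omega⟩
    · rintro ⟨h1, h2, h3⟩; exact ⟨⟨h1, h2⟩, by omega⟩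
  rcases pvLoopA_spec m w 0 (fun d _ => by omega) with ⟨r, heq, hgood, hmin⟩ | ⟨heq, hnone⟩
  · rw [heq]
    rcases pvMin2_spec (fun d => |d - w|)
        ((pvDivLoop m 1 PySem.Set.empty).filter (fun d => decide (|d - w| ≤ 63))) with
      ⟨r', heq', hmem', hall'⟩ | ⟨heq', hnil⟩
    · rw [heq']
      have hgood' : pvGood m w r' := (hnear r').mp hmem'
      have h1 := hmin r' hgood'
      have h2 := hall' r ((hnear r).mpr hgood)
      simp only [habs] at h2
      show r = r'
      omega
    · exfalso
      have := (hnear r).mpr hgood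
      rw [hnil] at this
      exact List.not_mem_nil this
  · rw [heq, pvLoopF_one m hm]
    have hnil : ((pvDivLoop m 1 PySem.Set.empty).filter (fun d => decide (|d - w| ≤ 63))) = [] := by
      cases hcase : ((pvDivLoop m 1 PySem.Set.empty).filter (fun d => decide (|d - w| ≤ 63))) with
      | nil => rfl
      | cons a t =>
        exfalso
        exact hnone a ((hnear a).mp (hcase ▸ List.mem_cons_self))
    rw [hnil]
    rfl

-- ===== VERDICT (by name: the statement is the Claim_ definition above) =====
theorem derive_n_head_spec : Claim_equal_derive_n_head := by
  intro d_model _hdom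
  unfold Spec_derive_n_head derive_n_head derive_n_head_alt
  exact pvMain_core (max 1 d_model) (max 1 (pvRound128 (max 1 d_model))) (le_max_left _ _)
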